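-- pv_equiv track=rewrite | github.com/vishy1214/dsa | dsa-python/design-guru/arrays/left_and_right_sum.py | findDifferenceArray_betterApproach
-- ===== SOURCE A (Python) =====
-- def findDifferenceArray_betterApproach(nums):
--         n = len(nums)
--         differenceArray = [0] * n
--         leftArr = [0] * n
--         rightArr = [0] * n
--         leftSum = 0
--         rightSum = 0
--
--         #leftSum
--         for i in range(len(nums)):
--             leftSum = leftSum + nums[i]
--             leftArr[i] = leftSum
--
--         #rightSum
--         for j in range(len(nums)-1,-1,-1):
--             rightSum = rightSum + nums[j]
--             rightArr[j] = rightSum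
--
--         #differenceArray
--         for d in range(len(nums)):
--             differenceArray[d] = abs(leftArr[d] - rightArr[d])
--
--         return differenceArray
-- ===== SOURCE B (Python) =====
-- def findDifferenceArray_betterApproach(nums):
--     total = sum(nums)
--     res = []
--     leftSum = 0
--     for x in nums:
--         leftSum += x
--         res.append(abs(2 * leftSum - total - x))
--     return res
-- ===== Notes on version B (the rewrite author's own statement) =====
-- stated objective: simpler
-- what changed: Replaced the three index loops and three preallocated arrays (prefix array, suffix array, difference array) by one forward pass over the elements: the suffix sum is recovered from the precomputed total as total - leftSum + x, so each output is abs(2*leftSum - total - x) and no intermediate arrays exist.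
import Mathlib
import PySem

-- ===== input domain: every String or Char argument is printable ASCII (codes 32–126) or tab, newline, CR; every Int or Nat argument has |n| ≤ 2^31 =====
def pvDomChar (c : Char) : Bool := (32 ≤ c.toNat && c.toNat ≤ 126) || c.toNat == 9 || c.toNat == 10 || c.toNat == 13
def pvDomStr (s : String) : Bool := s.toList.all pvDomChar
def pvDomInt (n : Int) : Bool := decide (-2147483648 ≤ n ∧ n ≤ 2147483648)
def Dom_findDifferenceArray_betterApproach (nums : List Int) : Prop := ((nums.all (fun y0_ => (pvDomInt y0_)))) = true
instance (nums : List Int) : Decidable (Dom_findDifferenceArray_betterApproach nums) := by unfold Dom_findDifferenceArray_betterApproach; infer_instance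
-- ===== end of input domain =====

-- B replaces A's three index loops over three preallocated arrays by a single forward
-- pass that recovers each suffix sum from the precomputed total (objective: simpler).

-- ===== PORT A =====
def findDifferenceArray_betterApproach (nums : List Int) : List Int :=
  let n : Int := nums.length
  let differenceArray := List.replicate nums.length (0 : Int)
  let leftArr := List.replicate nums.length (0 : Int)
  let rightArr := List.replicate nums.length (0 : Int)
  -- leftSum loop
  let lres := (PySem.List.pyRange 0 n 1).foldl
    (fun (st : Int × List Int) i =>
      let ls := st.1 + PySem.List.pyGetD nums i 0
      (ls, PySem.List.pySetD st.2 i ls)) (0, leftArr)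
  -- rightSum loop
  let rres := (PySem.List.pyRange (n - 1) (-1) (-1)).foldl
    (fun (st : Int × List Int) j =>
      let rs := st.1 + PySem.List.pyGetD nums j 0
      (rs, PySem.List.pySetD st.2 j rs)) (0, rightArr)
  -- differenceArray loop
  (PySem.List.pyRange 0 n 1).foldl
    (fun arr d =>
      PySem.List.pySetD arr d |PySem.List.pyGetD lres.2 d 0 - PySem.List.pyGetD rres.2 d 0|)
    differenceArray

-- ===== PORT B =====
-- 'for x in nums: leftSum += x; res.append(abs(2*leftSum - total - x))' as structural recursion
def pvAltGo (total : Int) : Int → List Int → List Int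
  | _, [] => []
  | leftSum, x :: xs =>
    let ls := leftSum + x
    |2 * ls - total - x| :: pvAltGo total ls xs

def findDifferenceArray_betterApproach_alt (nums : List Int) : List Int :=
  pvAltGo nums.sum 0 nums

-- ===== PRECONDITION & SPEC =====
def Spec_findDifferenceArray_betterApproach (nums : List Int) (out : List Int) : Prop := out = findDifferenceArray_betterApproach_alt nums
instance (nums : List Int) (out : List Int) : Decidable (Spec_findDifferenceArray_betterApproach nums out) := by unfold Spec_findDifferenceArray_betterApproach; infer_instance

-- ===== CLAIM (what is proved, stated in full; the proofs are below) =====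
def Claim_equal_findDifferenceArray_betterApproach : Prop := ∀ (nums : List Int), Dom_findDifferenceArray_betterApproach nums → Spec_findDifferenceArray_betterApproach nums (findDifferenceArray_betterApproach nums)

-- ===== LEMMAS AND PROOFS =====

theorem pv_set_map_range (n k : Nat) (v : Int) (g : Nat → Int) (hk : k < n) :
    ((List.range n).map g).set k v
      = (List.range n).map (fun i => if i = k then v else g i) := by
  apply List.ext_getElem
  · simp
  · intro i h1 h2
    simp only [List.getElem_set, List.getElem_map, List.getElem_range] at *
    split_ifs with h h' h'
    · rfl
    · exact absurd h.symm h'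
    · exact absurd h'.symm h
    · rfl

theorem pv_map_range_congr (n : Nat) (f g : Nat → Int) (h : ∀ i < n, f i = g i) :
    (List.range n).map f = (List.range n).map g := by
  apply List.map_congr_left
  intro i hi
  exact h i (List.mem_range.mp hi)

theorem pv_replicate_eq_map_range (n : Nat) :
    List.replicate n (0 : Int) = (List.range n).map (fun _ => 0) := by
  simp [List.map_const', List.eq_replicate_iff]

-- left loop: after indices [0, k), leftSum = sum of first k, leftArr[i] = prefix(i+1) for i < k
theorem pv_left_loop (nums : List Int) (k : Nat) (hk : k ≤ nums.length) :
    (PySem.List.pyRange 0 (k : Int) 1).foldl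
        (fun (st : Int × List Int) i =>
          let ls := st.1 + PySem.List.pyGetD nums i 0
          (ls, PySem.List.pySetD st.2 i ls))
        (0, (List.range nums.length).map (fun _ => 0))
      = ((nums.take k).sum,
         (List.range nums.length).map
           (fun i => if i < k then (nums.take (i + 1)).sum else 0)) := by
  induction k with
  | zero => simp [PySem.List.pyRange_zero_nat]
  | succ k ih =>
    have hk' : k ≤ nums.length := Nat.le_of_succ_le hk
    have hlt : k < nums.length := hk
    have hsplit : PySem.List.pyRange 0 ((k : Int) + 1) 1
        = PySem.List.pyRange 0 (k : Int) 1 ++ [(k : Int)] :=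
      PySem.List.pyRange_one_succ_right (by exact_mod_cast Nat.zero_le k)
    rw [show ((k + 1 : Nat) : Int) = (k : Int) + 1 by push_cast; ring, hsplit,
        List.foldl_append, ih hk']
    simp only [List.foldl_cons, List.foldl_nil]
    have hget : PySem.List.pyGetD nums (k : Int) 0 = nums[k] := by
      rw [PySem.List.pyGetD_natCast]; exact List.getD_eq_getElem _ _ hlt
    have hsum : (nums.take k).sum + nums[k] = (nums.take (k + 1)).sum := by
      rw [List.sum_take_succ _ _ hlt]
    rw [PySem.List.pySetD_natCast, hget, hsum,
        pv_set_map_range _ k _ _ hlt]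
    refine Prod.ext rfl ?_
    apply pv_map_range_congr
    intro i hi
    by_cases h1 : i = k
    · subst h1; simp
    · rcases Nat.lt_or_ge i k with h2 | h2
      · simp [h1, h2, Nat.lt_succ_of_lt h2]
      · have : ¬ i < k := Nat.not_lt.mpr h2
        have : ¬ i < k + 1 := by omega
        simp [h1, Nat.not_lt.mpr h2, this]

-- right loop: processing indices m-1 .. 0 adds (take m).sum to the running sum and
-- writes s + sum of (take m).drop i at each i < m
theorem pv_right_loop (nums : List Int) (m : Nat) (hm : m ≤ nums.length)
    (s : Int) (g : Nat → Int) :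
    (PySem.List.pyRange ((m : Int) - 1) (-1) (-1)).foldl
        (fun (st : Int × List Int) j =>
          let rs := st.1 + PySem.List.pyGetD nums j 0
          (rs, PySem.List.pySetD st.2 j rs))
        (s, (List.range nums.length).map g)
      = (s + (nums.take m).sum,
         (List.range nums.length).map
           (fun i => if i < m then s + ((nums.take m).drop i).sum else g i)) := by
  induction m generalizing s g with
  | zero =>
    rw [PySem.List.pyRange_neg_one_eq_nil (by norm_num)]
    simp
  | succ m ih =>
    have hm' : m ≤ nums.length := Nat.le_of_succ_le hm
    have hlt : m < nums.length := hm
    have hcons : PySem.List.pyRange (((m + 1 : Nat) : Int) - 1) (-1) (-1)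
        = (m : Int) :: PySem.List.pyRange ((m : Int) - 1) (-1) (-1) := by
      rw [show ((m + 1 : Nat) : Int) - 1 = (m : Int) by push_cast; ring]
      exact PySem.List.pyRange_neg_one_cons (show (-1:Int) < (m:Int) by omega)
    rw [hcons]
    simp only [List.foldl_cons]
    have hget : PySem.List.pyGetD nums (m : Int) 0 = nums[m] := by
      rw [PySem.List.pyGetD_natCast]; exact List.getD_eq_getElem _ _ hlt
    rw [hget, PySem.List.pySetD_natCast, pv_set_map_range _ m _ _ hlt]
    rw [ih hm' (s + nums[m]) _]
    have htake : nums.take (m + 1) = nums.take m ++ [nums[m]] := by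
      rw [List.take_succ]; simp [List.getElem?_eq_getElem hlt]
    refine Prod.ext ?_ ?_
    · simp only [htake, List.sum_append, List.sum_cons, List.sum_nil]
      ring
    · apply pv_map_range_congr
      intro i hi
      by_cases h1 : i < m
      · have h2 : i < m + 1 := Nat.lt_succ_of_lt h1
        have hdrop : (nums.take (m + 1)).drop i = (nums.take m).drop i ++ [nums[m]] := by
          rw [htake, List.drop_append_of_le_length]
          simp [List.length_take]
          omega
        simp only [h1, h2, if_pos, hdrop, List.sum_append, List.sum_cons, List.sum_nil]
        ring
      · by_cases h2 : i = m
        · have h2' : i < m + 1 := by omega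
          have hdrop : (nums.take (m + 1)).drop m = [nums[m]] := by
            rw [htake, List.drop_append_of_le_length (by simp [List.length_take]; omega)]
            rw [List.drop_eq_nil_of_le (by simp [List.length_take])]
            simp
          subst h2
          simp [h2', hdrop]
        · have h3 : ¬ i < m + 1 := by omega
          simp [h1, h2, h3]

-- difference loop: writing F d at each index d in [0, n) over a map-range array
theorem pv_fill_loop (n : Nat) (F : Int → Int) (k : Nat) (hk : k ≤ n) (g : Nat → Int) :
    (PySem.List.pyRange 0 (k : Int) 1).foldl
        (fun arr d => PySem.List.pySetD arr d (F d))
        ((List.range n).map g)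
      = (List.range n).map (fun i => if i < k then F i else g i) := by
  induction k with
  | zero => simp [PySem.List.pyRange_zero_nat]
  | succ k ih =>
    have hk' : k ≤ n := Nat.le_of_succ_le hk
    have hlt : k < n := hk
    have hsplit : PySem.List.pyRange 0 ((k : Int) + 1) 1
        = PySem.List.pyRange 0 (k : Int) 1 ++ [(k : Int)] :=
      PySem.List.pyRange_one_succ_right (by exact_mod_cast Nat.zero_le k)
    rw [show ((k + 1 : Nat) : Int) = (k : Int) + 1 by push_cast; ring, hsplit,
        List.foldl_append, ih hk']
    simp only [List.foldl_cons, List.foldl_nil]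
    rw [PySem.List.pySetD_natCast, pv_set_map_range _ k _ _ hlt]
    apply pv_map_range_congr
    intro i hi
    by_cases h1 : i = k
    · subst h1; simp
    · rcases Nat.lt_or_ge i k with h2 | h2
      · simp [h1, h2, Nat.lt_succ_of_lt h2]
      · have h3 : ¬ i < k + 1 := by omega
        simp [h1, Nat.not_lt.mpr h2, h3]

-- B's recursion as a map over indices
theorem pv_altGo_eq (xs : List Int) (total : Int) :
    ∀ s, pvAltGo total s xs
      = (List.range xs.length).map
          (fun i => |2 * (s + (xs.take (i + 1)).sum) - total - xs.getD i 0|) := by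
  induction xs with
  | nil => intro s; simp [pvAltGo]
  | cons x xs ih =>
    intro s
    rw [pvAltGo, ih (s + x)]
    simp only [List.length_cons, List.range_succ_eq_map, List.map_cons, List.map_map]
    congr 1
    · simp
    · apply pv_map_range_congr
      intro i hi
      simp only [Function.comp, List.take_succ_cons, List.sum_cons, List.getD_cons_succ]
      congr 1
      ring

theorem pv_getD_map_range (n i : Nat) (g : Nat → Int) (hi : i < n) :
    PySem.List.pyGetD ((List.range n).map g) (i : Int) 0 = g i := by
  rw [PySem.List.pyGetD_natCast, List.getD_eq_getElem _ _ (by simpa using hi)]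
  simp

-- ===== VERDICT (by name: the statement is the Claim_ definition above) =====
theorem findDifferenceArray_betterApproach_spec : Claim_equal_findDifferenceArray_betterApproach := by
  intro nums _
  show findDifferenceArray_betterApproach nums = findDifferenceArray_betterApproach_alt nums
  unfold findDifferenceArray_betterApproach findDifferenceArray_betterApproach_alt
  simp only
  rw [pv_replicate_eq_map_range]
  rw [show (nums.length : Int) = ((nums.length : Nat) : Int) from rfl]
  rw [pv_left_loop nums nums.length le_rfl,
      pv_right_loop nums nums.length le_rfl 0 (fun _ => 0),
      pv_fill_loop nums.length _ nums.length le_rfl,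
      pv_altGo_eq nums nums.sum 0]
  apply pv_map_range_congr
  intro i hi
  simp only [if_pos hi]
  rw [pv_getD_map_range _ _ _ hi, pv_getD_map_range _ _ _ hi]
  simp only [if_pos hi, List.take_length, zero_add]
  have h1 : (nums.take i).sum + (nums.drop i).sum = nums.sum :=
    List.sum_take_add_sum_drop nums i
  have h2 : (nums.take (i + 1)).sum = (nums.take i).sum + nums[i] :=
    List.sum_take_succ nums i hi
  have h3 : nums.getD i 0 = nums[i] := List.getD_eq_getElem _ _ hi
  rw [h2, h3]
  congr 1
  ring_nf
  omega
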